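-- pv_equiv track=rewrite | github.com/Maderator/School | less_important_subjects/statistical_methods_of_natural_language_processing/02_words_and_the_company_they_keep/word_classes.py | init_class_unigram_counts
-- ===== SOURCE A (Python) =====
-- def init_class_unigram_counts(words, classes, bigram_table):
--     '''
--     Initialize unigram counts for classes
--     returns
--         l_count - unigram count for classes on left side of bigrams
--         r_count - unigram count for classes on right side of bigrams
--     '''
--     l_count, r_count = {}, {}
--     cn = len(classes)
--     for cur_class in classes:
--         lc, rc = 0, 0 # count for left and right class unigram
--         for other_class in classes:
--             lb = (cur_class, other_class) # bigram with cur class on left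
--             rb = (other_class, cur_class) # bigram with cur class on right
--             lc += bigram_table[lb] # left count
--             rc += bigram_table[rb] # right count
--         l_count[cur_class] = lc
--         r_count[cur_class] = rc
--     return l_count, r_count
-- ===== SOURCE B (Python) =====
-- from collections import Counter
--
-- def init_class_unigram_counts(words, classes, bigram_table):
--     '''
--     Initialize unigram counts for classes
--     returns
--         l_count - unigram count for classes on left side of bigrams
--         r_count - unigram count for classes on right side of bigrams
--     '''
--     mult = Counter(classes)
--     l_count = {c: 0 for c in classes}
--     r_count = {c: 0 for c in classes}
--     for a, am in mult.items():
--         for b, bm in mult.items():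
--             v = bigram_table[(a, b)]
--             l_count[a] += v * bm
--             r_count[b] += v * am
--     return l_count, r_count
-- ===== Notes on version B (the rewrite author's own statement) =====
-- stated objective: alternative
-- what changed: A gathers two sums per class with a nested loop over the class list (two dict lookups per ordered pair, duplicates re-read); B builds a Counter of class multiplicities once, iterates the distinct ordered pairs only, reads each bigram exactly once and scatters it into both count dicts weighted by the multiplicities.
import Mathlib
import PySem

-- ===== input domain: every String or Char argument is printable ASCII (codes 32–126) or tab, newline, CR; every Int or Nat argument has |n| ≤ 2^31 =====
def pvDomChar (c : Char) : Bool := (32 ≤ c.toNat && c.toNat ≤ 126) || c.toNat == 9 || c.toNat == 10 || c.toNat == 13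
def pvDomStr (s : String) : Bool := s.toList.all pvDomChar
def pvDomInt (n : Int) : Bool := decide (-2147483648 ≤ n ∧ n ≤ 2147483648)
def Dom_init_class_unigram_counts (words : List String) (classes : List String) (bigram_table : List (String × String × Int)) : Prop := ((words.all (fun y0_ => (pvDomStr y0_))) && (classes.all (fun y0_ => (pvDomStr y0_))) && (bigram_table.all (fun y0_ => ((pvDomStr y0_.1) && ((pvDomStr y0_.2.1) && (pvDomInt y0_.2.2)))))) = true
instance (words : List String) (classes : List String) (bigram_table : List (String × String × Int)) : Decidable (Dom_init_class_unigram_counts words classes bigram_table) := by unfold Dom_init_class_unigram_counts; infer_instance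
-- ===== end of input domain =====

-- B replaces A's per-class gather (two dict lookups per ordered pair of the class list) by a
-- Counter-weighted scatter over distinct class pairs: one lookup per distinct pair (alternative).

-- ===== PORT A =====
-- bigram_table[(a, b)]: first matching entry of the association list; `none` is Python's
-- KeyError, excluded by Pre_ (the 0 default is never reached inside Pre_).
def pvTblGet (t : List (String × String × Int)) (a b : String) : Int :=
  match t.find? (fun e => e.1 == a && e.2.1 == b) with
  | some e => e.2.2
  | none => 0

def init_class_unigram_counts (words : List String) (classes : List String) (bigram_table : List (String × String × Int)) : (List (String × Int)) × (List (String × Int)) :=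
  let p := classes.foldl
    (fun (acc : PySem.Dict String Int × PySem.Dict String Int) cur =>
      let lr := classes.foldl
        (fun (lr : Int × Int) other =>
          (lr.1 + pvTblGet bigram_table cur other, lr.2 + pvTblGet bigram_table other cur))
        ((0 : Int), (0 : Int))
      (acc.1.insert cur lr.1, acc.2.insert cur lr.2))
    (PySem.Dict.empty, PySem.Dict.empty)
  (p.1.items, p.2.items)

-- ===== PORT B =====
def init_class_unigram_counts_alt (words : List String) (classes : List String) (bigram_table : List (String × String × Int)) : (List (String × Int)) × (List (String × Int)) :=
  let mult : PySem.Dict String Int := PySem.Dict.counter classes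
  let l0 : PySem.Dict String Int := classes.foldl (fun d c => d.insert c 0) PySem.Dict.empty
  let r0 : PySem.Dict String Int := classes.foldl (fun d c => d.insert c 0) PySem.Dict.empty
  let p := mult.items.foldl
    (fun (acc : PySem.Dict String Int × PySem.Dict String Int) a =>
      mult.items.foldl
        (fun (acc : PySem.Dict String Int × PySem.Dict String Int) b =>
          let v := pvTblGet bigram_table a.1 b.1
          (acc.1.modify a.1 0 (· + v * b.2), acc.2.modify b.1 0 (· + v * a.2)))
        acc)
    (l0, r0)
  (p.1.items, p.2.items)

-- ===== PRECONDITION & SPEC =====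
-- Pre_ excludes tables missing an ordered pair of classes; on those BOTH Pythons raise
-- KeyError (A and B read the same set of keys), so nothing is claimed there.
def Pre_init_class_unigram_counts (words : List String) (classes : List String) (bigram_table : List (String × String × Int)) : Prop :=
  ∀ a ∈ classes, ∀ b ∈ classes, (a, b) ∈ bigram_table.map (fun e => (e.1, e.2.1))
instance (words : List String) (classes : List String) (bigram_table : List (String × String × Int)) : Decidable (Pre_init_class_unigram_counts words classes bigram_table) := by unfold Pre_init_class_unigram_counts; infer_instance

def pvWitness_init_class_unigram_counts : List String × List String × (List (String × String × Int)) :=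
  (["hi"], ["a", "b"], [("a", "a", 1), ("a", "b", 2), ("b", "a", 3), ("b", "b", 4)])

def Spec_init_class_unigram_counts (words : List String) (classes : List String) (bigram_table : List (String × String × Int)) (out : (List (String × Int)) × (List (String × Int))) : Prop := out = init_class_unigram_counts_alt words classes bigram_table
instance (words : List String) (classes : List String) (bigram_table : List (String × String × Int)) (out : (List (String × Int)) × (List (String × Int))) : Decidable (Spec_init_class_unigram_counts words classes bigram_table out) := by unfold Spec_init_class_unigram_counts; infer_instance

-- ===== CLAIM (what is proved, stated in full; the proofs are below) =====
def Claim_equal_init_class_unigram_counts : Prop := ∀ (words : List String) (classes : List String) (bigram_table : List (String × String × Int)), Dom_init_class_unigram_counts words classes bigram_table → Pre_init_class_unigram_counts words classes bigram_table → Spec_init_class_unigram_counts words classes bigram_table (init_class_unigram_counts words classes bigram_table)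
-- ===== LEMMAS AND PROOFS =====

-- A's inner loop: a running pair of sums.
theorem pvInnerFold (t : List (String × String × Int)) (cs : List String) (cur : String) (x y : Int) :
    cs.foldl (fun (lr : Int × Int) o => (lr.1 + pvTblGet t cur o, lr.2 + pvTblGet t o cur)) (x, y)
      = (x + (cs.map (fun o => pvTblGet t cur o)).sum, y + (cs.map (fun o => pvTblGet t o cur)).sum) := by
  induction cs generalizing x y with
  | nil => simp
  | cons c cs ih => simp [List.foldl_cons, ih, add_assoc]

-- A's outer loop splits into two independent dict folds.
theorem pvPairInsertFold (cs : List String) (L R : String → Int)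
    (d1 d2 : PySem.Dict String Int) :
    cs.foldl (fun (acc : PySem.Dict String Int × PySem.Dict String Int) c =>
        (acc.1.insert c (L c), acc.2.insert c (R c))) (d1, d2)
      = (cs.foldl (fun d c => d.insert c (L c)) d1,
         cs.foldl (fun d c => d.insert c (R c)) d2) := by
  induction cs generalizing d1 d2 with
  | nil => rfl
  | cons c cs ih => simp [List.foldl_cons, ih]

-- B's inner loop splits into two independent dict folds.
theorem pvBInner (t : List (String × String × Int)) (I : List (String × Int))
    (a : String × Int) (d1 d2 : PySem.Dict String Int) :
    I.foldl (fun (acc : PySem.Dict String Int × PySem.Dict String Int) b =>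
        (acc.1.modify a.1 0 (· + pvTblGet t a.1 b.1 * b.2),
         acc.2.modify b.1 0 (· + pvTblGet t a.1 b.1 * a.2))) (d1, d2)
      = (I.foldl (fun d b => d.modify a.1 0 (· + pvTblGet t a.1 b.1 * b.2)) d1,
         I.foldl (fun d b => d.modify b.1 0 (· + pvTblGet t a.1 b.1 * a.2)) d2) := by
  induction I generalizing d1 d2 with
  | nil => rfl
  | cons b I ih => simp [List.foldl_cons, ih]

-- B's outer loop splits into two independent nested dict folds.
theorem pvBOuter (t : List (String × String × Int)) (I J : List (String × Int))
    (d1 d2 : PySem.Dict String Int) :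
    I.foldl (fun (acc : PySem.Dict String Int × PySem.Dict String Int) a =>
        (J.foldl (fun d b => d.modify a.1 0 (· + pvTblGet t a.1 b.1 * b.2)) acc.1,
         J.foldl (fun d b => d.modify b.1 0 (· + pvTblGet t a.1 b.1 * a.2)) acc.2)) (d1, d2)
      = (I.foldl (fun d a => J.foldl (fun d b => d.modify a.1 0 (· + pvTblGet t a.1 b.1 * b.2)) d) d1,
         I.foldl (fun d a => J.foldl (fun d b => d.modify b.1 0 (· + pvTblGet t a.1 b.1 * a.2)) d) d2) := by
  induction I generalizing d1 d2 with
  | nil => rfl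
  | cons a I ih => simp [List.foldl_cons, ih]

-- a nested fold is the fold over the product list
theorem pvNestedFold {α β σ : Type} (xs : List α) (ys : List β) (f : σ → α → β → σ) (s : σ) :
    xs.foldl (fun s a => ys.foldl (fun s b => f s a b) s) s
      = (xs.flatMap (fun a => ys.map (fun b => (a, b)))).foldl (fun s p => f s p.1 p.2) s := by
  induction xs generalizing s with
  | nil => rfl
  | cons a xs ih =>
    rw [List.foldl_cons, List.flatMap_cons, List.foldl_append, List.foldl_map, ih]

-- each key of a modify fold accumulates the filtered weighted sum
theorem pvModFoldGetD {E : Type} (xs : List E) (k : E → String) (w : E → Int)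
    (d : PySem.Dict String Int) (c : String) :
    (xs.foldl (fun d e => d.modify (k e) 0 (· + w e)) d).getD c 0
      = d.getD c 0 + ((xs.filter (fun e => k e == c)).map w).sum := by
  induction xs generalizing d with
  | nil => simp
  | cons e xs ih =>
    rw [List.foldl_cons, ih, PySem.Dict.getD_modify, List.filter_cons]
    by_cases hc : c = k e
    · have hb : (k e == c) = true := by simp [hc]
      rw [if_pos hc, hb]
      simp only [if_true, List.map_cons, List.sum_cons]
      rw [hc]
      ring
    · have hkc : (k e == c) = false := by simpa using fun h => hc h.symm
      rw [if_neg hc]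
      simp [hkc]

-- a modify fold does not change the key set when every touched key is present
theorem pvModFoldKeys {E : Type} (xs : List E) (k : E → String) (w : E → Int)
    (d : PySem.Dict String Int)
    (h : ∀ e ∈ xs, d.contains (k e) = true) :
    (xs.foldl (fun d e => d.modify (k e) 0 (· + w e)) d).keys = d.keys := by
  induction xs generalizing d with
  | nil => rfl
  | cons e xs ih =>
    rw [List.foldl_cons]
    have hkeys : (d.modify (k e) 0 (· + w e)).keys = d.keys := by
      rw [PySem.Dict.keys_modify,
          PySem.Dict.keys_insert_of_contains _ _ (h e List.mem_cons_self)]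
    rw [ih _ (by
      intro e' he'
      rw [PySem.Dict.contains_modify]
      simp [h e' (List.mem_cons_of_mem _ he')])]
    exact hkeys

-- filtering the product list on the left component
theorem pvFilterProdFst {α β : Type} (xs : List α) (ys : List β) (q : α → Bool) :
    (xs.flatMap (fun a => ys.map (fun b => (a, b)))).filter (fun p => q p.1)
      = (xs.filter q).flatMap (fun a => ys.map (fun b => (a, b))) := by
  induction xs with
  | nil => rfl
  | cons a xs ih =>
    rw [List.flatMap_cons, List.filter_append, ih, List.filter_cons, List.filter_map]
    by_cases hq : q a = true
    · have h1 : (ys.filter ((fun (p : α × β) => q p.1) ∘ (fun b => (a, b)))) = ys := by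
        rw [List.filter_eq_self]
        intro b _
        simpa using hq
      rw [h1, if_pos hq, List.flatMap_cons]
    · have h1 : (ys.filter ((fun (p : α × β) => q p.1) ∘ (fun b => (a, b)))) = [] := by
        rw [List.filter_eq_nil_iff]
        intro b _
        simpa using hq
      rw [h1, if_neg (by simpa using hq)]
      simp

-- filtering the product list on the right component
theorem pvFilterProdSnd {α β : Type} (xs : List α) (ys : List β) (q : β → Bool) :
    (xs.flatMap (fun a => ys.map (fun b => (a, b)))).filter (fun p => q p.2)
      = xs.flatMap (fun a => (ys.filter q).map (fun b => (a, b))) := by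
  induction xs with
  | nil => rfl
  | cons a xs ih =>
    rw [List.flatMap_cons, List.filter_append, ih, List.flatMap_cons, List.filter_map]
    rfl

-- an insert fold keyed by the elements themselves: the last write wins, and every
-- write at a given key carries the same value L key
theorem pvInsertFoldGetD (cs : List String) (L : String → Int) (d : PySem.Dict String Int)
    (x : String) :
    (cs.foldl (fun d c => d.insert c (L c)) d).getD x 0
      = if x ∈ cs then L x else d.getD x 0 := by
  induction cs generalizing d with
  | nil => simp
  | cons c cs ih =>
    rw [List.foldl_cons, ih]
    by_cases hx : x ∈ cs
    · simp [hx]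
    · by_cases hc : x = c
      · simp [hx, hc, PySem.Dict.getD_insert]
      · simp [hx, hc, PySem.Dict.getD_insert]

-- a sum over a list with multiplicities is the count-weighted sum over its distinct elements
theorem pvSumByCount (cs : List String) (f : String → Int) :
    (cs.map f).sum
      = ((PySem.Set.ofList cs).map (fun o => f o * (cs.count o : Int))).sum := by
  rw [Finset.sum_list_map_count]
  have hfs : (PySem.Set.ofList cs).toFinset = cs.toFinset := by
    ext x
    simp [PySem.Set.mem_ofList]
  rw [← List.sum_toFinset _ (PySem.Set.nodup_ofList cs), hfs]
  apply Finset.sum_congr rfl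
  intro x _
  simp [mul_comm, zsmul_eq_mul]

-- in a nodup list, filtering for one contained element yields exactly that element
theorem pvFilterSingle {α : Type} [BEq α] [LawfulBEq α] (l : List α) (c : α)
    (hnd : l.Nodup) (hc : c ∈ l) :
    l.filter (fun x => x == c) = [c] := by
  rw [List.filter_beq, List.count_eq_one_of_mem hnd hc, List.replicate_one]

theorem pvMainEq (words : List String) (classes : List String) (t : List (String × String × Int)) :
    init_class_unigram_counts words classes t = init_class_unigram_counts_alt words classes t := by
  have hAfun : (fun (acc : PySem.Dict String Int × PySem.Dict String Int) cur =>
      let lr := classes.foldl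
        (fun (lr : Int × Int) other =>
          (lr.1 + pvTblGet t cur other, lr.2 + pvTblGet t other cur))
        ((0 : Int), (0 : Int))
      (acc.1.insert cur lr.1, acc.2.insert cur lr.2))
    = (fun (acc : PySem.Dict String Int × PySem.Dict String Int) cur =>
        (acc.1.insert cur ((classes.map (fun o => pvTblGet t cur o)).sum),
         acc.2.insert cur ((classes.map (fun o => pvTblGet t o cur)).sum))) := by
    funext acc cur
    rw [pvInnerFold]
    simp
  have hBfun : (fun (acc : PySem.Dict String Int × PySem.Dict String Int) (a : String × Int) =>
      (PySem.Dict.counter classes).items.foldl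
        (fun (acc : PySem.Dict String Int × PySem.Dict String Int) b =>
          let v := pvTblGet t a.1 b.1
          (acc.1.modify a.1 0 (· + v * b.2), acc.2.modify b.1 0 (· + v * a.2)))
        acc)
    = (fun (acc : PySem.Dict String Int × PySem.Dict String Int) a =>
        ((PySem.Dict.counter classes).items.foldl
           (fun d b => d.modify a.1 0 (· + pvTblGet t a.1 b.1 * b.2)) acc.1,
         (PySem.Dict.counter classes).items.foldl
           (fun d b => d.modify b.1 0 (· + pvTblGet t a.1 b.1 * a.2)) acc.2)) := by
    funext acc a
    rw [show acc = (acc.1, acc.2) from rfl, pvBInner]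
  unfold init_class_unigram_counts init_class_unigram_counts_alt
  simp only []
  rw [hAfun, pvPairInsertFold, hBfun, pvBOuter, pvNestedFold, pvNestedFold]
  -- the zero dict shared by both components of B
  set d0 : PySem.Dict String Int :=
    classes.foldl (fun d c => d.insert c 0) PySem.Dict.empty with hd0
  have hkeys0 : d0.keys = PySem.Set.ofList classes := by
    rw [hd0]
    have := PySem.Dict.keys_foldl_insert classes (fun _ _ => (0 : Int)) PySem.Dict.empty
    simpa using this
  have hndS : (PySem.Set.ofList classes).Nodup := PySem.Set.nodup_ofList classes
  have hgetD0 : ∀ c, d0.getD c 0 = 0 := by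
    intro c
    rw [hd0]
    have := pvInsertFoldGetD classes (fun _ => 0) PySem.Dict.empty c
    simpa [PySem.Dict.getD_empty] using this
  have hcont0 : ∀ x, d0.contains x = decide (x ∈ classes) := by
    intro x
    rw [PySem.Dict.contains_eq_decide_mem_keys, hkeys0]
    simp [PySem.Set.mem_ofList]
  have hI : (PySem.Dict.counter classes).items
      = (PySem.Set.ofList classes).map (fun k => (k, (classes.count k : Int))) :=
    PySem.Dict.items_counter classes
  have hmemI : ∀ p ∈ (PySem.Dict.counter classes).items.flatMap
      (fun a => (PySem.Dict.counter classes).items.map (fun b => (a, b))),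
      p.1.1 ∈ classes ∧ p.2.1 ∈ classes := by
    intro p hp
    rcases List.mem_flatMap.mp hp with ⟨a, ha, hb⟩
    rcases List.mem_map.mp hb with ⟨b, hbI, hpe⟩
    subst hpe
    rw [hI] at ha hbI
    rcases List.mem_map.mp ha with ⟨ka, hka, hae⟩
    rcases List.mem_map.mp hbI with ⟨kb, hkb, hbe⟩
    subst hae; subst hbe
    exact ⟨(PySem.Set.mem_ofList classes ka).mp hka,
           (PySem.Set.mem_ofList classes kb).mp hkb⟩
  have hAitems : ∀ (L : String → Int),
      (classes.foldl (fun d c => d.insert c (L c)) PySem.Dict.empty).items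
        = (PySem.Set.ofList classes).map (fun c => (c, L c)) := by
    intro L
    have hk : (classes.foldl (fun d c => d.insert c (L c)) PySem.Dict.empty).keys
        = PySem.Set.ofList classes := by
      have := PySem.Dict.keys_foldl_insert classes (fun _ c => L c) PySem.Dict.empty
      simpa using this
    have hnd : (classes.foldl (fun d c => d.insert c (L c)) PySem.Dict.empty).keys.Nodup := by
      rw [hk]; exact hndS
    rw [PySem.Dict.items_eq_map_keys _ hnd 0, hk]
    apply List.map_congr_left
    intro c hc
    rw [pvInsertFoldGetD, if_pos ((PySem.Set.mem_ofList classes c).mp hc)]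
  have hBkeys1 : (((PySem.Dict.counter classes).items.flatMap
        (fun a => (PySem.Dict.counter classes).items.map (fun b => (a, b)))).foldl
      (fun d p => d.modify p.1.1 0 (· + pvTblGet t p.1.1 p.2.1 * p.2.2)) d0).keys
      = PySem.Set.ofList classes := by
    rw [pvModFoldKeys _ _ _ _ (by
      intro p hp
      rw [hcont0]
      simpa using (hmemI p hp).1), hkeys0]
  have hBkeys2 : (((PySem.Dict.counter classes).items.flatMap
        (fun a => (PySem.Dict.counter classes).items.map (fun b => (a, b)))).foldl
      (fun d p => d.modify p.2.1 0 (· + pvTblGet t p.1.1 p.2.1 * p.1.2)) d0).keys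
      = PySem.Set.ofList classes := by
    rw [pvModFoldKeys _ _ _ _ (by
      intro p hp
      rw [hcont0]
      simpa using (hmemI p hp).2), hkeys0]
  refine Prod.ext ?_ ?_
  · dsimp only
    rw [hAitems, PySem.Dict.items_eq_map_keys _ (by rw [hBkeys1]; exact hndS) 0, hBkeys1]
    apply List.map_congr_left
    intro c hcS
    have hc : c ∈ classes := (PySem.Set.mem_ofList classes c).mp hcS
    have hPf : ((PySem.Dict.counter classes).items.flatMap
          (fun a => (PySem.Dict.counter classes).items.map (fun b => (a, b)))).filter
            (fun p => p.1.1 == c)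
        = (PySem.Dict.counter classes).items.map
            (fun b => ((c, (classes.count c : Int)), b)) := by
      rw [pvFilterProdFst _ _ (fun (a : String × Int) => a.1 == c), hI, List.filter_map]
      have h1 : ((PySem.Set.ofList classes).filter
            ((fun (a : String × Int) => a.1 == c) ∘ fun k => (k, (classes.count k : Int))))
          = (PySem.Set.ofList classes).filter (fun x => x == c) := by
        apply List.filter_congr
        intro x _
        rfl
      rw [h1, pvFilterSingle _ c hndS hcS, List.map_cons, List.map_nil, List.flatMap_cons,
          List.flatMap_nil, List.append_nil]
    rw [pvModFoldGetD, hgetD0, zero_add,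
        pvSumByCount classes (fun o => pvTblGet t c o), hPf,
        List.map_map, hI, List.map_map]
    rfl
  · dsimp only
    rw [hAitems, PySem.Dict.items_eq_map_keys _ (by rw [hBkeys2]; exact hndS) 0, hBkeys2]
    apply List.map_congr_left
    intro c hcS
    have hc : c ∈ classes := (PySem.Set.mem_ofList classes c).mp hcS
    have hPf : ((PySem.Dict.counter classes).items.flatMap
          (fun a => (PySem.Dict.counter classes).items.map (fun b => (a, b)))).filter
            (fun p => p.2.1 == c)
        = (PySem.Dict.counter classes).items.map
            (fun a => (a, (c, (classes.count c : Int)))) := by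
      rw [pvFilterProdSnd _ _ (fun (b : String × Int) => b.1 == c), hI, List.filter_map]
      have h1 : ((PySem.Set.ofList classes).filter
            ((fun (b : String × Int) => b.1 == c) ∘ fun k => (k, (classes.count k : Int))))
          = (PySem.Set.ofList classes).filter (fun x => x == c) := by
        apply List.filter_congr
        intro x _
        rfl
      rw [h1, pvFilterSingle _ c hndS hcS, List.map_cons, List.map_nil]
      rw [show (fun (a : String × Int) =>
            List.map (fun b => (a, b)) [((c : String), (classes.count c : Int))])
          = (fun (a : String × Int) => [(a, ((c : String), (classes.count c : Int)))]) from rfl,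
          ← List.map_eq_flatMap]
    rw [pvModFoldGetD, hgetD0, zero_add,
        pvSumByCount classes (fun o => pvTblGet t o c), hPf,
        List.map_map, hI, List.map_map]
    rfl

-- ===== VERDICT (by name: the statement is the Claim_ definition above) =====
theorem init_class_unigram_counts_spec : Claim_equal_init_class_unigram_counts := by
  intro words classes t _ _
  unfold Spec_init_class_unigram_counts
  exact pvMainEq words classes t
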